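-- pv_equiv track=rewrite | github.com/jeet1912/leetcode | arrays_and_strings/two_pointers.py | reverseSegment
-- ===== SOURCE A (Python) =====
-- def reverseSegment(string,ch):
--     if ch not in string:
--         return string
--     arr = list(string)
--     i = j = 0
--     length = len(arr)
--     while j<length and arr[j]!=ch:
--         j+=1
--     while i<j:
--         arr[i],arr[j] = arr[j],arr[i]
--         i+=1
--         j-=1
--     return "".join(arr)
-- ===== SOURCE B (Python) =====
-- def reverseSegment(string, ch):
--     if ch not in string:
--         return string
--     idx = string.index(ch)
--     return string[:idx + 1][::-1] + string[idx + 1:]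
-- ===== Notes on version B (the rewrite author's own statement) =====
-- stated objective: idiomatic
-- what changed: Replaces the list conversion, the hand-rolled index-scan while loop and the in-place two-pointer swap loop with str.index plus slice reversal and concatenation; Pre_ excludes exactly the inputs on which A raises IndexError (ch occurs as a substring but is not a single character, on a nonempty string).
import Mathlib
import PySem

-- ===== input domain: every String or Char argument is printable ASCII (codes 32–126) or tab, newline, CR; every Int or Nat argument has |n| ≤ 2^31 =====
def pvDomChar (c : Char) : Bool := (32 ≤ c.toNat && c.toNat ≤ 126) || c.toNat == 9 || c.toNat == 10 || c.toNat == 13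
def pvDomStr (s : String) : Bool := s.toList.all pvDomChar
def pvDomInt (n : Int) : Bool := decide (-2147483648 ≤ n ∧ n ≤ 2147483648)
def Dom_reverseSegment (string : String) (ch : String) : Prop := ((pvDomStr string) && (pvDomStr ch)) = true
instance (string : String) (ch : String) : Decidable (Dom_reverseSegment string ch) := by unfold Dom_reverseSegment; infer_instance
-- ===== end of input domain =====

-- B replaces A's list conversion, index-scan while loop and in-place two-pointer
-- swap with str.index plus slice reversal (idiomatic; same cost).


-- ===== PORT A =====
-- 'while j < length and arr[j] != ch: j += 1'  (arr[j] is a 1-char string; comparing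
-- its char list with ch.toList is exactly Python's string equality)
def pvFindJ (arr chL : List Char) (j : Nat) : Nat :=
  if h : j < arr.length then
    if [arr[j]] = chL then j else pvFindJ arr chL (j + 1)
  else j
termination_by arr.length - j

-- 'while i < j: arr[i], arr[j] = arr[j], arr[i]; i += 1; j -= 1'
-- (on out-of-range j Python raises IndexError — excluded by Pre_; the port returns arr there)
def pvSwapLoop (arr : List Char) (i j : Nat) : List Char :=
  if i < j then
    match arr[i]?, arr[j]? with
    | some a, some b => pvSwapLoop ((arr.set i b).set j a) (i + 1) (j - 1)
    | _, _ => arr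
  else arr
termination_by j - i

def reverseSegment (string : String) (ch : String) : String :=
  if PySem.Str.isIn ch string = false then string
  else
    let arr := string.toList
    let j := pvFindJ arr ch.toList 0
    String.ofList (pvSwapLoop arr 0 j)

-- ===== PORT B =====
-- 'idx = string.index(ch)' is PySem.Str.find (index = find when ch is present, which
-- the guard guarantees; .index would raise ValueError only when absent);
-- string[:idx+1] / string[idx+1:] with idx+1 ≥ 0 are take/drop, [::-1] is reverse
def reverseSegment_alt (string : String) (ch : String) : String :=
  if PySem.Str.isIn ch string = false then string
  else
    let s := string.toList
    let idx := (PySem.Chars.find s ch.toList).toNat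
    String.ofList ((s.take (idx + 1)).reverse ++ s.drop (idx + 1))

-- ===== PRECONDITION & SPEC =====
-- Pre_ excludes exactly the inputs where A raises IndexError: ch occurs as a substring
-- but no single character equals ch (empty or multi-char ch) and the string is nonempty.
def Pre_reverseSegment (string : String) (ch : String) : Prop :=
  PySem.Str.isIn ch string = false ∨ ch.toList.length = 1 ∨ string.toList = []
instance (string : String) (ch : String) : Decidable (Pre_reverseSegment string ch) := by
  unfold Pre_reverseSegment; infer_instance
def pvWitness_reverseSegment : String × String := ("abcdefd", "d")

def Spec_reverseSegment (string : String) (ch : String) (out : String) : Prop := out = reverseSegment_alt string ch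
instance (string : String) (ch : String) (out : String) : Decidable (Spec_reverseSegment string ch out) := by unfold Spec_reverseSegment; infer_instance

-- ===== CLAIM (what is proved, stated in full; the proofs are below) =====
def Claim_equal_reverseSegment : Prop := ∀ (string : String) (ch : String), Dom_reverseSegment string ch → Pre_reverseSegment string ch → Spec_reverseSegment string ch (reverseSegment string ch)

-- ===== LEMMAS AND PROOFS =====

lemma findJ_eq (arr chL : List Char) : ∀ (j : Nat), j ≤ arr.length →
    pvFindJ arr chL j =
      j + (((arr.drop j).findIdx? (fun c => [c] = chL)).getD (arr.length - j)) := by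
  intro j hj
  induction j using pvFindJ.induct arr chL with
  | case1 j h hmatch =>
    rw [pvFindJ, dif_pos h, if_pos hmatch, List.drop_eq_getElem_cons h, List.findIdx?_cons]
    simp [hmatch]
  | case2 j h hmatch ih =>
    rw [pvFindJ, dif_pos h, if_neg hmatch, List.drop_eq_getElem_cons h, List.findIdx?_cons]
    rw [ih (by omega)]
    rcases hfi : (arr.drop (j+1)).findIdx? (fun c => [c] = chL) with _ | m <;>
      simp [hmatch] <;> omega
  | case3 j h =>
    rw [pvFindJ, dif_neg h]
    have : j = arr.length := by omega
    subst this
    simp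

lemma swapLoop_step (arr : List Char) (i j : Nat) (a b : Char) (h : i < j)
    (ha : arr[i]? = some a) (hb : arr[j]? = some b) :
    pvSwapLoop arr i j = pvSwapLoop ((arr.set i b).set j a) (i + 1) (j - 1) := by
  rw [pvSwapLoop, if_pos h, ha, hb]

lemma swapLoop_stop (arr : List Char) (i j : Nat) (h : ¬ i < j) :
    pvSwapLoop arr i j = arr := by
  rw [pvSwapLoop, if_neg h]

lemma swapLoop_get? (arr : List Char) (i j : Nat) (hj : j < arr.length) (k : Nat) :
    (pvSwapLoop arr i j)[k]? =
      if i ≤ k ∧ k ≤ j then arr[(i + j) - k]? else arr[k]? := by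
  induction arr, i, j using pvSwapLoop.induct with
  | case1 arr i j h a b hb ha ih =>
    rw [swapLoop_step arr i j a b h ha hb]
    have hil : i < arr.length := by omega
    have ha' : a = arr[i] := by rw [List.getElem?_eq_getElem hil] at ha; exact (Option.some.inj ha).symm
    have hb' : b = arr[j] := by rw [List.getElem?_eq_getElem hj] at hb; exact (Option.some.inj hb).symm
    rw [ih (by simp only [List.length_set]; omega)]
    have hget : ∀ (m : Nat),
        (((arr.set i b).set j a))[m]? = if j = m then some a
          else if i = m then some b else arr[m]? := by
      intro m
      rw [List.getElem?_set, List.getElem?_set, List.length_set]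
      split_ifs <;> rfl
    by_cases hc : i + 1 ≤ k ∧ k ≤ j - 1
    · rw [if_pos hc, if_pos (by omega : i ≤ k ∧ k ≤ j), hget]
      rw [if_neg (by omega), if_neg (by omega)]
      congr 1; omega
    · rw [if_neg hc, hget]
      by_cases hkj : j = k
      · rw [if_pos hkj, if_pos (by omega : i ≤ k ∧ k ≤ j), ha',
          (by omega : i + j - k = i), List.getElem?_eq_getElem hil]
      · rw [if_neg hkj]
        by_cases hki : i = k
        · rw [if_pos hki, if_pos (by omega : i ≤ k ∧ k ≤ j), hb',
          (by omega : i + j - k = j), List.getElem?_eq_getElem hj]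
        · rw [if_neg hki, if_neg (by omega)]
  | case2 arr i j h hnone =>
    exfalso
    have hil : i < arr.length := by omega
    exact hnone _ _ (List.getElem?_eq_getElem hil) (List.getElem?_eq_getElem hj)
  | case3 arr i j h =>
    rw [swapLoop_stop arr i j h]
    split_ifs with hc
    · congr 1; omega
    · rfl

-- [d] is a prefix of s.drop i exactly when s[i]? = some d
lemma single_prefix_drop (s : List Char) (d : Char) (i : Nat) :
    ([d] <+: s.drop i) ↔ s[i]? = some d := by
  have h0 : s[i]? = (s.drop i)[0]? := by
    simp [List.getElem?_drop]
  rw [h0]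
  cases hdr : s.drop i with
  | nil => simp
  | cons x t =>
    constructor
    · intro hp
      obtain ⟨hxd, _⟩ := List.cons_prefix_cons.mp hp
      simp [hxd]
    · intro hx
      simp only [List.getElem?_cons_zero, Option.some.injEq] at hx
      exact List.cons_prefix_cons.mpr ⟨hx.symm, List.nil_prefix⟩

-- Python's str.find (= str.index when present) on a 1-char pattern is findIdx?
lemma find_single_eq (s : List Char) (d : Char) (idx : Nat)
    (hidx : s.findIdx? (fun x => decide ([x] = [d])) = some idx) :
    PySem.Chars.find s [d] = (idx : Int) := by
  obtain ⟨hlt, hfi⟩ := List.findIdx?_eq_some_iff_findIdx_eq.mp hidx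
  subst hfi
  have hgetd : s[List.findIdx (fun x => decide ([x] = [d])) s]? = some d := by
    rw [List.getElem?_eq_getElem hlt]
    have hp := List.findIdx_getElem (p := fun x => decide ([x] = [d])) (xs := s) (w := hlt)
    simp only [decide_eq_true_eq, List.cons.injEq, and_true] at hp
    simp [hp]
  have hmin : ∀ j < List.findIdx (fun x => decide ([x] = [d])) s, s[j]? ≠ some d := by
    intro j hji hj
    have hne := List.not_of_lt_findIdx (p := fun x => decide ([x] = [d]))
      (xs := s) (i := j) hji
    have hjl : j < s.length := by omega
    rw [List.getElem?_eq_getElem hjl, Option.some.injEq] at hj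
    simp at hne
    exact hne hj
  have hinf : [d] <:+: s := by
    rw [← PySem.Chars.isIn_iff_infix, ← PySem.Chars.exists_prefix_drop_iff_isIn]
    exact ⟨_, (single_prefix_drop s d _).mpr hgetd⟩
  have hnn : 0 ≤ PySem.Chars.find s [d] := (PySem.Chars.find_nonneg_iff _ _).mpr hinf
  obtain ⟨hpre, hfmin⟩ := PySem.Chars.find_spec hnn
  have hfd : s[(PySem.Chars.find s [d]).toNat]? = some d :=
    (single_prefix_drop s d _).mp hpre
  have h1 : ¬ (PySem.Chars.find s [d]).toNat < List.findIdx (fun x => decide ([x] = [d])) s :=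
    fun h => hmin _ h hfd
  have h2 : ¬ List.findIdx (fun x => decide ([x] = [d])) s < (PySem.Chars.find s [d]).toNat :=
    fun h => hfmin _ h ((single_prefix_drop s d _).mpr hgetd)
  omega

lemma reverseSegment_eq_on (string ch : String)
    (hin : PySem.Str.isIn ch string = true)
    (hpre : Pre_reverseSegment string ch) :
    reverseSegment string ch = reverseSegment_alt string ch := by
  unfold reverseSegment reverseSegment_alt
  rw [hin]
  simp only [Bool.true_eq_false, if_false]
  rcases hpre with h | hlen | hnil
  · rw [hin] at h; cases h
  · -- ch is a single character d
    obtain ⟨d, hd⟩ : ∃ d, ch.toList = [d] := by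
      rcases hch : ch.toList with _ | ⟨d, t⟩ <;> rw [hch] at hlen <;> simp_all
    have hinf : [d] <:+: string.toList := by
      rw [PySem.Str.isIn_iff_infix, hd] at hin; exact hin
    have hmem : d ∈ string.toList := hinf.sublist.subset (by simp)
    have hany : string.toList.any (fun x => decide ([x] = ch.toList)) = true := by
      rw [List.any_eq_true]; exact ⟨d, hmem, by simp [hd]⟩
    obtain ⟨idx, hidx⟩ : ∃ idx,
        string.toList.findIdx? (fun x => decide ([x] = ch.toList)) = some idx := by
      rw [← Option.isSome_iff_exists, List.findIdx?_isSome]; exact hany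
    have hlt : idx < string.toList.length :=
      (List.findIdx?_eq_some_iff_findIdx_eq.mp hidx).1
    have hfj : pvFindJ string.toList ch.toList 0 = idx := by
      rw [findJ_eq string.toList ch.toList 0 (by omega)]
      simp [hidx]
    have hfind : PySem.Chars.find string.toList ch.toList = (idx : Int) := by
      rw [hd]; exact find_single_eq string.toList d idx (by rw [hd] at hidx; exact hidx)
    rw [hfj, hfind]
    simp only [Int.toNat_natCast]
    apply congrArg
    apply List.ext_getElem?
    intro k
    rw [swapLoop_get? string.toList 0 idx hlt k]
    have htl : (string.toList.take (idx + 1)).reverse.length = idx + 1 := by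
      rw [List.length_reverse, List.length_take]; omega
    by_cases hk : k ≤ idx
    · rw [if_pos (by omega)]
      rw [List.getElem?_append_left (by omega)]
      rw [List.getElem?_eq_getElem (by omega : k < (string.toList.take (idx + 1)).reverse.length)]
      rw [List.getElem?_eq_getElem (by omega : 0 + idx - k < string.toList.length)]
      congr 1
      rw [List.getElem_reverse, List.getElem_take]
      congr 1
      rw [List.length_take]
      omega
    · rw [if_neg (by omega)]
      rw [List.getElem?_append_right (by omega), htl, List.getElem?_drop]
      congr 1
      omega
  · -- the empty string: ch must be empty too; both sides return ""
    have h1 : pvFindJ string.toList ch.toList 0 = 0 := by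
      rw [pvFindJ, dif_neg (by rw [hnil]; simp)]
    have h2 : pvSwapLoop string.toList 0 0 = string.toList :=
      swapLoop_stop _ _ _ (by omega)
    have hch : ch.toList = [] := by
      rw [PySem.Str.isIn_iff_infix, hnil] at hin
      exact List.eq_nil_of_infix_nil hin
    rw [h1, h2, hnil, hch]
    simp [PySem.Chars.find_nil]

-- ===== VERDICT (by name: the statement is the Claim_ definition above) =====
theorem reverseSegment_spec : Claim_equal_reverseSegment := by
  intro string ch _ hpre
  unfold Spec_reverseSegment
  by_cases hin : PySem.Str.isIn ch string = false
  · unfold reverseSegment reverseSegment_alt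
    rw [hin]
    simp
  · exact reverseSegment_eq_on string ch (by revert hin; cases PySem.Str.isIn ch string <;> simp) hpre
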